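-- pv_equiv track=rewrite | github.com/prcmandl/sca_tool_evaluation | src/evaluation/adapters/osv.py | _events_to_spec
-- ===== SOURCE A (Python) =====
-- from typing import List, Optional
--
-- def _events_to_spec(events: list[dict]) -> Optional[str]:
--     introduced = None
--     fixed = None
--     last_affected = None
--
--     for e in events:
--         if "introduced" in e:
--             introduced = e["introduced"]
--         if "fixed" in e:
--             fixed = e["fixed"]
--         if "last_affected" in e:
--             last_affected = e["last_affected"]
--
--     parts = []
--
--     # introduced
--     if introduced and introduced != "0":
--         parts.append(f">={introduced}")
--
--     # upper bound
--     if fixed: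
--         parts.append(f"<{fixed}")
--     elif last_affected:
--         parts.append(f"<={last_affected}")
--
--     # Special case: introduced == "0" and upper bound exists
--     if introduced == "0" and (fixed or last_affected):
--         pass  # upper bound already handled
--
--     return ",".join(parts) if parts else None
-- ===== SOURCE B (Python) =====
-- from typing import List, Optional
--
--
-- def _events_to_spec(events: list[dict]) -> Optional[str]:
--     def last(key):
--         return next((e[key] for e in reversed(events) if key in e), None)
--
--     introduced = last("introduced")
--     fixed = last("fixed")
--     last_affected = last("last_affected")
--
--     lower = f">={introduced}" if introduced and introduced != "0" else None
--     upper = f"<{fixed}" if fixed else (f"<={last_affected}" if last_affected else None)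
--     parts = [p for p in (lower, upper) if p]
--     return ",".join(parts) if parts else None
-- ===== Notes on version B (the rewrite author's own statement) =====
-- stated objective: idiomatic
-- what changed: Replaces the single loop that tracks three last-seen values with three independent reverse-scan next() searches (first reverse match = last forward value), and builds the spec from two optional bound expressions filtered for truthiness instead of appending to a shared parts list.
import Mathlib
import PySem

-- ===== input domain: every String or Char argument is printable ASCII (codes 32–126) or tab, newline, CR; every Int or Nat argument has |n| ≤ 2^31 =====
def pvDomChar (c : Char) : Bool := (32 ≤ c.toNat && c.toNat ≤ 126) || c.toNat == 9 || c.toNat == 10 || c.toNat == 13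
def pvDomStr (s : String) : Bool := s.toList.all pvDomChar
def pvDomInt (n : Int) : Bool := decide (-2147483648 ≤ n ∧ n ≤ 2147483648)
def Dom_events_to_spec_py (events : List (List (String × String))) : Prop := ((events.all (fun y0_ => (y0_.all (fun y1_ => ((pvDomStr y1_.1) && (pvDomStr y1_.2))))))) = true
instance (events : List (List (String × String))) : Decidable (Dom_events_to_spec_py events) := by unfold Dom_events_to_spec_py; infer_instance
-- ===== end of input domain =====

-- B replaces A's single three-variable tracking loop with three independent reverse-scan
-- searches and two optional bound expressions; objective: more idiomatic decomposition.


-- shared primitive: Python dict lookup on an association list (first match), used by both ports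
def pyLookup (e : List (String × String)) (k : String) : Option String :=
  match e.find? (fun p => p.1 == k) with
  | some p => some p.2
  | none => none

-- ===== PORT A =====
-- one pass over events; each of the three variables keeps the last value seen
def stepA (st : Option String × Option String × Option String) (e : List (String × String)) :
    Option String × Option String × Option String :=
  (match pyLookup e "introduced" with | some v => some v | none => st.1,
   match pyLookup e "fixed" with | some v => some v | none => st.2.1,
   match pyLookup e "last_affected" with | some v => some v | none => st.2.2)

def events_to_spec_py (events : List (List (String × String))) : Option String :=
  let st := events.foldl stepA (none, none, none)
  let parts : List String :=
    (match st.1 with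
     | some s => if s = "" then [] else if s = "0" then [] else [">=" ++ s]
     | none => []) ++
    (match st.2.1 with
     | some f =>
         if f = "" then
           (match st.2.2 with
            | some l => if l = "" then [] else ["<=" ++ l]
            | none => [])
         else ["<" ++ f]
     | none =>
         match st.2.2 with
         | some l => if l = "" then [] else ["<=" ++ l]
         | none => [])
  if parts = [] then none else some (String.intercalate "," parts)

-- ===== PORT B =====
-- next((e[k] for e in reversed(events) if k in e), None)
def revFind (events : List (List (String × String))) (k : String) : Option String :=
  events.reverse.findSome? (fun e => pyLookup e k)

def events_to_spec_py_alt (events : List (List (String × String))) : Option String :=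
  let introduced := revFind events "introduced"
  let fixed := revFind events "fixed"
  let lastAffected := revFind events "last_affected"
  let lower : Option String :=
    match introduced with
    | some s => if s = "" then none else if s = "0" then none else some (">=" ++ s)
    | none => none
  let upper : Option String :=
    match fixed with
    | some f =>
        if f = "" then
          (match lastAffected with
           | some l => if l = "" then none else some ("<=" ++ l)
           | none => none)
        else some ("<" ++ f)
    | none =>
        match lastAffected with
        | some l => if l = "" then none else some ("<=" ++ l)
        | none => none
  -- [p for p in (lower, upper) if p] : keep truthy values (not None, not "")
  let parts : List String :=
    [lower, upper].filterMap (fun p =>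
      match p with
      | some s => if s = "" then none else some s
      | none => none)
  if parts = [] then none else some (String.intercalate "," parts)

-- ===== PRECONDITION & SPEC =====
def Spec_events_to_spec_py (events : List (List (String × String))) (out : Option String) : Prop := out = events_to_spec_py_alt events
instance (events : List (List (String × String))) (out : Option String) : Decidable (Spec_events_to_spec_py events out) := by unfold Spec_events_to_spec_py; infer_instance

-- ===== CLAIM (what is proved, stated in full; the proofs are below) =====
def Claim_equal_events_to_spec_py : Prop := ∀ (events : List (List (String × String))), Dom_events_to_spec_py events → Spec_events_to_spec_py events (events_to_spec_py events)

-- ===== LEMMAS AND PROOFS =====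

-- last-match-forward equals first-match-in-reverse, threaded through an initial value
def oOr (o : Option String) (init : Option String) : Option String :=
  match o with | some v => some v | none => init

theorem oOr_none (o : Option String) : oOr o none = o := by
  cases o <;> rfl

theorem revFind_cons (e : List (String × String)) (es : List (List (String × String)))
    (k : String) : revFind (e :: es) k = oOr (revFind es k) (pyLookup e k) := by
  unfold revFind
  rw [List.reverse_cons, List.findSome?_append]
  cases h : (es.reverse.findSome? (fun e => pyLookup e k)) <;>
    cases h2 : pyLookup e k <;> simp [h2, oOr, List.findSome?]

theorem oOr_assoc (a b init : Option String) : oOr (oOr a b) init = oOr a (oOr b init) := by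
  cases a <;> cases b <;> rfl

theorem foldA_eq (events : List (List (String × String))) :
    ∀ st, events.foldl stepA st =
      (oOr (revFind events "introduced") st.1,
       oOr (revFind events "fixed") st.2.1,
       oOr (revFind events "last_affected") st.2.2) := by
  induction events with
  | nil => intro st; simp [revFind, oOr]
  | cons e es ih =>
      intro st
      rw [List.foldl_cons, ih, revFind_cons, revFind_cons, revFind_cons,
          oOr_assoc, oOr_assoc, oOr_assoc]
      rfl

-- the tail computations of the two ports coincide for every triple of extracted values
theorem finish_eq (i f l : Option String) :
    (let parts : List String :=
      (match i with
       | some s => if s = "" then [] else if s = "0" then [] else [">=" ++ s]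
       | none => []) ++
      (match f with
       | some fv =>
           if fv = "" then
             (match l with
              | some lv => if lv = "" then [] else ["<=" ++ lv]
              | none => [])
           else ["<" ++ fv]
       | none =>
           match l with
           | some lv => if lv = "" then [] else ["<=" ++ lv]
           | none => [])
     if parts = [] then none else some (String.intercalate "," parts)) =
    (let lower : Option String :=
      match i with
      | some s => if s = "" then none else if s = "0" then none else some (">=" ++ s)
      | none => none
     let upper : Option String :=
      match f with
      | some fv =>
          if fv = "" then
            (match l with
             | some lv => if lv = "" then none else some ("<=" ++ lv)
             | none => none)
          else some ("<" ++ fv)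
      | none =>
          match l with
          | some lv => if lv = "" then none else some ("<=" ++ lv)
          | none => none
     let parts : List String :=
      [lower, upper].filterMap (fun p =>
        match p with
        | some s => if s = "" then none else some s
        | none => none)
     if parts = [] then none else some (String.intercalate "," parts)) := by
  cases i <;> cases f <;> cases l <;>
    simp [List.filterMap] <;>
    split_ifs <;>
    simp_all

-- ===== VERDICT (by name: the statement is the Claim_ definition above) =====
theorem events_to_spec_py_spec : Claim_equal_events_to_spec_py := by
  intro events _
  unfold Spec_events_to_spec_py events_to_spec_py events_to_spec_py_alt
  rw [foldA_eq, oOr_none, oOr_none, oOr_none]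
  exact finish_eq _ _ _
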